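-- pv_equiv track=rewrite | github.com/0Desom0/Desom-OlivaDice-Plugin | 娱乐/TexasHoldem/function.py | getNumberPara
-- ===== SOURCE A (Python) =====
-- def getNumberPara(data, reverse=False):
--     """
--     从字符串中分离出数字和非数字部分。
--
--     Args:
--         data: 输入字符串
--         reverse: False时从左往右找数字，True时从右往左找数字
--
--     Returns:
--         [非数字部分, 数字部分] (当reverse=False)
--         或 [数字部分, 非数字部分] (当reverse=True)
--     """
--     tmp_output_str_1 = ''
--     tmp_output_str_2 = ''
--     if len(data) > 0:
--         flag_have_para = False
--         tmp_offset = 0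
--         tmp_total_offset = 0
--         while True:
--             tmp_offset += 1
--             if reverse:
--                 tmp_total_offset = len(data) - tmp_offset
--             else:
--                 tmp_total_offset = tmp_offset - 1
--             if not reverse and tmp_total_offset >= len(data):
--                 flag_have_para = True
--                 break
--             if reverse and tmp_total_offset < 0:
--                 tmp_total_offset = 0
--                 flag_have_para = True
--                 break
--             if data[tmp_total_offset].isdecimal():
--                 pass
--             else:
--                 flag_have_para = True
--                 if reverse:
--                     tmp_total_offset += 1
--                 break
--         if flag_have_para:
--             tmp_output_str_1 = data[:tmp_total_offset]
--             tmp_output_str_2 = data[tmp_total_offset:]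
--     return [tmp_output_str_1, tmp_output_str_2]
-- ===== SOURCE B (Python) =====
-- def getNumberPara(data, reverse=False):
--     digits = '0123456789'
--     if reverse:
--         b = len(data.rstrip(digits))
--     else:
--         b = len(data) - len(data.lstrip(digits))
--     return [data[:b], data[b:]]
-- ===== Notes on version B (the rewrite author's own statement) =====
-- stated objective: idiomatic
-- what changed: A's manual while-loop with offset bookkeeping and a flag is replaced by stripping the digit run from the relevant end (str.lstrip/rstrip with '0123456789'), reading the split boundary off the stripped length, and slicing once.
import Mathlib
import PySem

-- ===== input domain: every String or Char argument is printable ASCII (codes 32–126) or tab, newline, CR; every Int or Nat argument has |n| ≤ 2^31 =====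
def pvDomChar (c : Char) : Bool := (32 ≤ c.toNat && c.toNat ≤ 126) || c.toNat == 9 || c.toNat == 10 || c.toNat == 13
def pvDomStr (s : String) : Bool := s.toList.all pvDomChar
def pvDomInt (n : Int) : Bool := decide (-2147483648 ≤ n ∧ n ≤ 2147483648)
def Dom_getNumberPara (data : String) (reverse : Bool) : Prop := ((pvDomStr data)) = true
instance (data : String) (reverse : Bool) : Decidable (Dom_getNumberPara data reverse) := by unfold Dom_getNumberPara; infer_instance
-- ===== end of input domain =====

-- B replaces A's manual offset/flag scan with lstrip/rstrip over '0123456789' plus one slice (idiomatic; same return values on the ASCII domain).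
-- ===== PORT A =====
-- A splits a string at the digit/non-digit boundary with a manual offset loop (left-to-right,
-- or right-to-left when reverse=True). Port: the while-loop as fuel recursion (fuel = len+1
-- merely makes the loop total; it is never exhausted). data[i].isdecimal() with i proven in
-- range is ported as getD + PySem.Chars.isdigit (isdecimal = isdigit on the ASCII domain).
def pvALoop (cs : List Char) (reverse : Bool) (offset : Int) : Nat → Int
  | 0 => 0
  | fuel + 1 =>
    let off := offset + 1
    let tot : Int := if reverse then (cs.length : Int) - off else off - 1
    if reverse = false ∧ (cs.length : Int) ≤ tot then tot
    else if reverse = true ∧ tot < 0 then 0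
    else if PySem.Chars.isdigit (cs.getD tot.toNat ' ') then pvALoop cs reverse off fuel
    else if reverse then tot + 1 else tot

def getNumberPara (data : String) (reverse : Bool) : List String :=
  let cs := data.toList
  if 0 < cs.length then
    let tot := pvALoop cs reverse 0 (cs.length + 1)
    [String.mk (PySem.List.slice cs none (some tot)), String.mk (PySem.List.slice cs (some tot) none)]
  else ["", ""]

-- ===== PORT B =====
-- B (Source B): strip the digit run from the relevant end (lstrip/rstrip over '0123456789'),
-- read the boundary off the stripped length, slice once. No scanning loop of its own.
def pvDigits : List Char := ['0', '1', '2', '3', '4', '5', '6', '7', '8', '9']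

def getNumberPara_alt (data : String) (reverse : Bool) : List String :=
  let cs := data.toList
  -- data.rstrip(digits) = drop the trailing run; data.lstrip(digits) = cs.dropWhile (∈ digits)
  let b : Nat :=
    if reverse then ((cs.reverse.dropWhile (fun c => pvDigits.contains c)).length)
    else cs.length - (cs.dropWhile (fun c => pvDigits.contains c)).length
  [String.mk (cs.take b), String.mk (cs.drop b)]

-- ===== PRECONDITION & SPEC =====
def Spec_getNumberPara (data : String) (reverse : Bool) (out : List String) : Prop := out = getNumberPara_alt data reverse
instance (data : String) (reverse : Bool) (out : List String) : Decidable (Spec_getNumberPara data reverse out) := by unfold Spec_getNumberPara; infer_instance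

-- ===== CLAIM (what is proved, stated in full; the proofs are below) =====
def Claim_equal_getNumberPara : Prop := ∀ (data : String) (reverse : Bool), Dom_getNumberPara data reverse → Spec_getNumberPara data reverse (getNumberPara data reverse)

-- ===== LEMMAS AND PROOFS =====
theorem pvDig_eq : (fun c => pvDigits.contains c) = PySem.Chars.isdigit := by
  funext c
  simp only [pvDigits, PySem.Chars.isdigit, List.contains_eq_mem, List.mem_cons,
    List.not_mem_nil, or_false]
  have key : (c = '0' ∨ c = '1' ∨ c = '2' ∨ c = '3' ∨ c = '4' ∨ c = '5' ∨ c = '6' ∨ c = '7' ∨ c = '8' ∨ c = '9') ↔ ('0' ≤ c ∧ c ≤ '9') := by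
    constructor
    · rintro (rfl | rfl | rfl | rfl | rfl | rfl | rfl | rfl | rfl | rfl) <;> exact ⟨by decide, by decide⟩
    · rintro ⟨h1, h2⟩
      have amin : 48 ≤ c.val.toNat := h1
      have amax : c.val.toNat ≤ 57 := h2
      simp only [Char.ext_iff, ← UInt32.toNat_inj,
        show ('0':Char).val.toNat = 48 from rfl, show ('1':Char).val.toNat = 49 from rfl,
        show ('2':Char).val.toNat = 50 from rfl, show ('3':Char).val.toNat = 51 from rfl,
        show ('4':Char).val.toNat = 52 from rfl, show ('5':Char).val.toNat = 53 from rfl,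
        show ('6':Char).val.toNat = 54 from rfl, show ('7':Char).val.toNat = 55 from rfl,
        show ('8':Char).val.toNat = 56 from rfl, show ('9':Char).val.toNat = 57 from rfl]
      omega
  simp [key]

-- takeWhile/dropWhile split the length
theorem pvLen_split (cs : List Char) (p : Char → Bool) :
    (cs.takeWhile p).length + (cs.dropWhile p).length = cs.length := by
  rw [← List.length_append, List.takeWhile_append_dropWhile]

-- A's forward loop counts the leading digit run
theorem pvALoop_false (cs : List Char) : ∀ (fuel off : Nat), off ≤ cs.length → cs.length - off < fuel →
    pvALoop cs false (off : Int) fuel = (off : Int) + (((cs.drop off).takeWhile PySem.Chars.isdigit).length : Int) := by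
  intro fuel
  induction fuel with
  | zero => intro off _ h; omega
  | succ f ih =>
    intro off hle hfuel
    simp only [pvALoop, Bool.false_eq_true, if_false, true_and, false_and]
    rw [show ((off : Int) + 1 - 1) = (off : Int) by ring]
    by_cases hend : off = cs.length
    · subst hend
      simp
    · have hlt : off < cs.length := by omega
      rw [if_neg (by exact_mod_cast by omega : ¬ ((cs.length : Int) ≤ (off : Int)))]
      have hgetD : cs.getD ((off : Int)).toNat ' ' = cs[off] := by
        simp [List.getD_eq_getElem?_getD, List.getElem?_eq_getElem hlt]
      rw [hgetD]
      have hdrop : cs.drop off = cs[off] :: cs.drop (off + 1) := List.drop_eq_getElem_cons hlt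
      by_cases hd : PySem.Chars.isdigit cs[off]
      · rw [if_pos hd]
        have := ih (off + 1) (by omega) (by omega)
        rw [show ((off : Int) + 1) = ((off + 1 : Nat) : Int) by push_cast; ring, this]
        rw [hdrop, List.takeWhile_cons_of_pos hd]
        simp only [List.length_cons]
        push_cast; ring
      · rw [if_neg hd]
        rw [hdrop, List.takeWhile_cons_of_neg hd]
        simp
-- A's reverse loop counts the trailing digit run (scanned via the reversed list)
theorem pvALoop_true (cs : List Char) : ∀ (fuel off : Nat), off ≤ cs.length → cs.length - off < fuel →
    pvALoop cs true (off : Int) fuel = (cs.length : Int) - (off : Int) - (((cs.reverse.drop off).takeWhile PySem.Chars.isdigit).length : Int) := by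
  intro fuel
  induction fuel with
  | zero => intro off _ h; omega
  | succ f ih =>
    intro off hle hfuel
    simp only [pvALoop, Bool.true_eq_false, if_true, true_and, false_and, if_false]
    by_cases hend : off = cs.length
    · subst hend
      rw [if_pos (by omega)]
      simp
    · have hlt : off < cs.length := by omega
      have hr : off < cs.reverse.length := by simpa using hlt
      rw [if_neg (by omega : ¬ ((cs.length : Int) - ((off : Int) + 1) < 0))]
      have htot : ((cs.length : Int) - ((off : Int) + 1)) = ((cs.length - (off + 1) : Nat) : Int) := by
        push_cast [Nat.cast_sub (by omega : off + 1 ≤ cs.length)]; ring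
      have hgetD : cs.getD ((cs.length : Int) - ((off : Int) + 1)).toNat ' ' = cs.reverse[off] := by
        rw [htot]
        have hlt2 : cs.length - (off + 1) < cs.length := by omega
        simp [List.getD_eq_getElem?_getD, List.getElem?_eq_getElem hlt2,
          List.getElem_reverse]
        congr 1
        omega
      rw [hgetD]
      have hdrop : cs.reverse.drop off = cs.reverse[off] :: cs.reverse.drop (off + 1) :=
        List.drop_eq_getElem_cons hr
      by_cases hd : PySem.Chars.isdigit cs.reverse[off]
      · rw [if_pos hd]
        have := ih (off + 1) (by omega) (by omega)
        rw [show ((off : Int) + 1) = ((off + 1 : Nat) : Int) by push_cast; ring, this]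
        rw [hdrop, List.takeWhile_cons_of_pos hd]
        simp only [List.length_cons]
        push_cast; ring
      · rw [if_neg hd]
        rw [hdrop, List.takeWhile_cons_of_neg hd]
        simp only [List.length_nil, Nat.cast_zero]
        ring

-- ===== VERDICT (by name: the statement is the Claim_ definition above) =====
theorem getNumberPara_spec : Claim_equal_getNumberPara := by
  unfold Claim_equal_getNumberPara
  intro data reverse _
  unfold Spec_getNumberPara getNumberPara getNumberPara_alt
  simp only [pvDig_eq]
  set cs := data.toList with hcs
  by_cases hnil : 0 < cs.length
  case neg =>
    have he : cs = [] := List.eq_nil_of_length_eq_zero (by omega)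
    rw [if_neg hnil]
    simp only [he, List.take_nil, List.drop_nil]
    constructor
  case pos =>
    rw [if_pos hnil]
    cases reverse
    case false =>
      have hloop := pvALoop_false cs (cs.length + 1) 0 (by omega) (by omega)
      simp only [Nat.cast_zero, zero_add, List.drop_zero] at hloop
      have hb : cs.length - (cs.dropWhile PySem.Chars.isdigit).length
          = (cs.takeWhile PySem.Chars.isdigit).length := by
        have := pvLen_split cs PySem.Chars.isdigit; omega
      simp only [Bool.false_eq_true, if_false, hloop, hb,
        PySem.List.slice_to_natCast, PySem.List.slice_from_natCast]
    case true =>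
      have hloop := pvALoop_true cs (cs.length + 1) 0 (by omega) (by omega)
      simp only [Nat.cast_zero, sub_zero, List.drop_zero] at hloop
      have hb : ((cs.length : Int) - ((cs.reverse.takeWhile PySem.Chars.isdigit).length : Int))
          = (((cs.reverse.dropWhile PySem.Chars.isdigit).length : Nat) : Int) := by
        have := pvLen_split cs.reverse PySem.Chars.isdigit
        simp only [List.length_reverse] at this
        omega
      simp only [if_true, hloop, hb,
        PySem.List.slice_to_natCast, PySem.List.slice_from_natCast]
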